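-- pv_equiv track=rewrite | github.com/joshlevy89/llm_judge_debate | deprecated/experiments/run_augmented_math_majority_vote.py | determine_ground_truth
-- ===== SOURCE A (Python) =====
-- def determine_ground_truth(oracle_results):
--     ground_truth = {}
--     valid_count = 0
--     none_count = 0
--
--     for idx, result in oracle_results.items():
--         ans = result.get('parsed_answer')
--         if ans is not None:
--             ground_truth[idx] = ans
--             valid_count += 1
--         else:
--             ground_truth[idx] = None
--             none_count += 1
--
--     return ground_truth, valid_count, none_count
-- ===== SOURCE B (Python) =====
-- def determine_ground_truth(oracle_results):
--     # Divide-and-conquer: solve each half of the item list independently,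
--     # then merge the half-results (dict union + count addition).
--     items = list(oracle_results.items())
--
--     def solve(seg):
--         if len(seg) == 0:
--             return {}, 0, 0
--         if len(seg) == 1:
--             idx, result = seg[0]
--             ans = result.get('parsed_answer')
--             return {idx: ans}, (1 if ans is not None else 0), (0 if ans is not None else 1)
--         mid = len(seg) // 2
--         left_gt, lv, ln = solve(seg[:mid])
--         right_gt, rv, rn = solve(seg[mid:])
--         left_gt.update(right_gt)
--         return left_gt, lv + rv, ln + rn
--
--     return solve(items)
-- ===== Notes on version B (the rewrite author's own statement) =====
-- stated objective: alternative
-- what changed: A's single fused left-to-right loop (insert into the dict while bumping two counters) is replaced by a divide-and-conquer recursion: the item list is split in half, each half is solved independently, and the half-results are merged by dict union and count addition; correct because dict keys are unique, so union of the halves preserves order, and the counts are additive over concatenation.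
import Mathlib
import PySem

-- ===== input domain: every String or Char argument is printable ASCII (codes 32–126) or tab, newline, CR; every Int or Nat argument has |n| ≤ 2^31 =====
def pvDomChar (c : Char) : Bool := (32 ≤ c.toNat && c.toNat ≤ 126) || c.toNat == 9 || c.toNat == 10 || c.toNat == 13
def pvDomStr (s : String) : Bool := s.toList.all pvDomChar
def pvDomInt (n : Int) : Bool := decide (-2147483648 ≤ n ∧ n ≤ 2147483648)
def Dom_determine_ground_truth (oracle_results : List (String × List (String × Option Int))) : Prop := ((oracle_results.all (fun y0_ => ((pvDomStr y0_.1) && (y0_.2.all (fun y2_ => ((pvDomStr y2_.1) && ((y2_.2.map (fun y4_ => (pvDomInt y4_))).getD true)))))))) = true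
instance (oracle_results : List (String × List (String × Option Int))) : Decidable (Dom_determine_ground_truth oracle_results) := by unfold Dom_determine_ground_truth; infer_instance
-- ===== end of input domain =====

-- B replaces A's single fused insert-and-count loop by a divide-and-conquer recursion
-- (solve each half of the item list, merge by dict union + count addition); objective: alternative.
-- Both ports read the dict arguments through PySem.Dict.ofList (duplicate keys collapse
-- exactly as Python dict construction does).

-- ===== PORT A =====
-- single loop: insert into ground_truth and bump one of the two counters per item
def determine_ground_truth (oracle_results : List (String × List (String × Option Int))) : (List (String × Option Int)) × Int × Int :=
  let fin :=
    (PySem.Dict.ofList oracle_results).items.foldl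
      (fun (st : PySem.Dict String (Option Int) × Int × Int) p =>
        let ans : Option Int := ((PySem.Dict.ofList p.2).get? "parsed_answer").join
        if ans.isSome then (st.1.insert p.1 ans, st.2.1 + 1, st.2.2)
        else (st.1.insert p.1 none, st.2.1, st.2.2 + 1))
      (PySem.Dict.empty, 0, 0)
  (fin.1.items, fin.2.1, fin.2.2)

-- ===== PORT B =====
-- the per-item answer extraction: result.get('parsed_answer')
def pvAnsB (p : String × List (String × Option Int)) : Option Int :=
  ((PySem.Dict.ofList p.2).get? "parsed_answer").join

-- Source B's inner 'solve': split the segment in half, recurse, merge by dict union + count addition.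
-- (seg[:mid] / seg[mid:] with 0 ≤ mid ≤ len are exactly List.take / List.drop;
--  left_gt.update(right_gt) is the insert-fold of right's items into left, exactly Python's dict.update.)
def pvSolve : List (String × List (String × Option Int)) → PySem.Dict String (Option Int) × Int × Int
  | [] => (PySem.Dict.empty, 0, 0)
  | [p] =>
    let ans := pvAnsB p
    (PySem.Dict.empty.insert p.1 ans, if ans.isSome then 1 else 0, if ans.isSome then 0 else 1)
  | p :: q :: rest =>
    let mid := (p :: q :: rest).length / 2
    let L := pvSolve ((p :: q :: rest).take mid)
    let R := pvSolve ((p :: q :: rest).drop mid)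
    (R.1.items.foldl (fun d a => d.insert a.1 a.2) L.1, L.2.1 + R.2.1, L.2.2 + R.2.2)
termination_by seg => seg.length
decreasing_by
  · simp only [List.length_take, List.length_cons]; omega
  · simp only [List.length_drop, List.length_cons]; omega

def determine_ground_truth_alt (oracle_results : List (String × List (String × Option Int))) : (List (String × Option Int)) × Int × Int :=
  let r := pvSolve (PySem.Dict.ofList oracle_results).items
  (r.1.items, r.2.1, r.2.2)

-- ===== PRECONDITION & SPEC =====
def Spec_determine_ground_truth (oracle_results : List (String × List (String × Option Int))) (out : (List (String × Option Int)) × Int × Int) : Prop := out = determine_ground_truth_alt oracle_results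
instance (oracle_results : List (String × List (String × Option Int))) (out : (List (String × Option Int)) × Int × Int) : Decidable (Spec_determine_ground_truth oracle_results out) := by unfold Spec_determine_ground_truth; infer_instance

-- ===== CLAIM (what is proved, stated in full; the proofs are below) =====
def Claim_equal_determine_ground_truth : Prop := ∀ (oracle_results : List (String × List (String × Option Int))), Dom_determine_ground_truth oracle_results → Spec_determine_ground_truth oracle_results (determine_ground_truth oracle_results)

-- ===== LEMMAS AND PROOFS =====

-- A's fused loop, characterised: the dict is the insert-fold of the mapped pairs,
-- valid counts the isSome items, none counts the rest.
theorem pvLoopA (l : List (String × List (String × Option Int)))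
    (d : PySem.Dict String (Option Int)) (v n : Int) :
    l.foldl
      (fun (st : PySem.Dict String (Option Int) × Int × Int) p =>
        let ans : Option Int := pvAnsB p
        if ans.isSome then (st.1.insert p.1 ans, st.2.1 + 1, st.2.2)
        else (st.1.insert p.1 none, st.2.1, st.2.2 + 1))
      (d, v, n)
    = (l.foldl (fun d p => d.insert p.1 (pvAnsB p)) d,
       v + ((l.filter (fun p => (pvAnsB p).isSome)).length : Int),
       n + ((l.length : Int) - ((l.filter (fun p => (pvAnsB p).isSome)).length : Int))) := by
  induction l generalizing d v n with
  | nil => simp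
  | cons p l ih =>
    by_cases h : (pvAnsB p).isSome
    · simp only [List.foldl_cons, List.filter_cons, List.length_cons, h, if_true]
      rw [ih]
      refine Prod.ext rfl (Prod.ext ?_ ?_) <;> (simp; try omega)
    · have hnone : pvAnsB p = none := by
        cases hp : pvAnsB p <;> simp [hp] at h ⊢
      simp only [List.foldl_cons, List.filter_cons, List.length_cons, h, if_false,
        Bool.false_eq_true]
      rw [show (PySem.Dict.insert d p.1 none) = d.insert p.1 (pvAnsB p) from by rw [hnone], ih]
      refine Prod.ext rfl (Prod.ext ?_ ?_) <;> (simp; try omega)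

-- B's divide-and-conquer, characterised on a segment with distinct keys:
-- same dict (as an items list) and the same two counts.
theorem pvSolve_eq (seg : List (String × List (String × Option Int)))
    (h : (seg.map Prod.fst).Nodup) :
    pvSolve seg
      = (PySem.Dict.mk (seg.map (fun p => (p.1, pvAnsB p))),
         ((seg.filter (fun p => (pvAnsB p).isSome)).length : Int),
         (seg.length : Int) - ((seg.filter (fun p => (pvAnsB p).isSome)).length : Int)) := by
  fun_induction pvSolve seg with
  | case1 => rfl
  | case2 p =>
    show (PySem.Dict.empty.insert p.1 (pvAnsB p),
          if (pvAnsB p).isSome then (1 : Int) else 0,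
          if (pvAnsB p).isSome then (0 : Int) else 1) = _
    by_cases hp : (pvAnsB p).isSome <;>
      refine Prod.ext (PySem.Dict.ext ?_) (Prod.ext ?_ ?_) <;>
        simp [hp, PySem.Dict.items_insert_of_not_contains, PySem.Dict.empty]
  | case3 p q rest mid L R ihL ihR =>
    rw [show L = pvSolve (List.take mid (p :: q :: rest)) from rfl,
        show R = pvSolve (List.drop mid (p :: q :: rest)) from rfl]
    set seg := p :: q :: rest with hseg
    have hsplit : seg.take mid ++ seg.drop mid = seg := List.take_append_drop _ _
    have hmaps : (seg.take mid).map Prod.fst ++ (seg.drop mid).map Prod.fst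
        = seg.map Prod.fst := by rw [← List.map_append, hsplit]
    have hnd : ((seg.take mid).map Prod.fst ++ (seg.drop mid).map Prod.fst).Nodup := by
      rw [hmaps]; exact h
    have hndL := hnd.of_append_left
    have hndR := hnd.of_append_right
    have hdisj := List.disjoint_of_nodup_append hnd
    rw [ihL hndL, ihR hndR]
    have hfresh : ∀ a ∈ (seg.drop mid).map (fun p => (p.1, pvAnsB p)),
        (PySem.Dict.mk ((seg.take mid).map (fun p => (p.1, pvAnsB p)))).contains a.1 = false := by
      intro a ha
      rw [PySem.Dict.contains_mk]
      simp only [List.any_eq_false]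
      intro b hb
      simp only [List.mem_map] at ha hb
      obtain ⟨x, hx, rfl⟩ := ha
      obtain ⟨y, hy, rfl⟩ := hb
      have : y.1 ≠ x.1 := by
        intro hxy
        exact hdisj (List.mem_map_of_mem hy) (by rw [hxy]; exact List.mem_map_of_mem hx)
      simpa using this
    have hndkeys : (((seg.drop mid).map (fun p => (p.1, pvAnsB p))).map Prod.fst).Nodup := by
      simpa [List.map_map, Function.comp_def] using hndR
    have hitems := PySem.Dict.items_foldl_insert_fresh
      ((seg.drop mid).map (fun p => (p.1, pvAnsB p))) Prod.fst Prod.snd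
      (PySem.Dict.mk ((seg.take mid).map (fun p => (p.1, pvAnsB p)))) hfresh hndkeys
    refine Prod.ext (PySem.Dict.ext ?_) (Prod.ext ?_ ?_)
    · show (List.foldl (fun (d : PySem.Dict String (Option Int)) (a : String × Option Int) => d.insert a.1 a.2) _ _).items = _
      rw [hitems]
      show (seg.take mid).map _ ++ _ = _
      rw [show (fun (a : String × Option Int) => (a.1, a.2)) = id from by funext a; rfl]
      rw [List.map_id, ← List.map_append, hsplit]
    · show (((seg.take mid).filter _).length : Int) + (((seg.drop mid).filter _).length : Int) = _
      rw [← Nat.cast_add, ← List.length_append, ← List.filter_append, hsplit]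
    · show ((seg.take mid).length : Int) - _ + (((seg.drop mid).length : Int) - _) = _
      have h1 : (seg.take mid).length + (seg.drop mid).length = seg.length := by
        rw [← List.length_append, hsplit]
      have h2 : ((seg.take mid).filter (fun p => (pvAnsB p).isSome)).length
          + ((seg.drop mid).filter (fun p => (pvAnsB p).isSome)).length
          = (seg.filter (fun p => (pvAnsB p).isSome)).length := by
        rw [← List.length_append, ← List.filter_append, hsplit]
      push_cast [← h1, ← h2]
      ring

theorem determine_ground_truth_spec : Claim_equal_determine_ground_truth := by
  intro oracle_results _
  unfold Spec_determine_ground_truth determine_ground_truth determine_ground_truth_alt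
  set l := (PySem.Dict.ofList oracle_results).items with hl
  have hkeys : (l.map Prod.fst).Nodup := by
    have h1 := PySem.Dict.nodup_keys_ofList (ps := oracle_results)
    simpa [PySem.Dict.keys, hl] using h1
  have hA := pvLoopA l PySem.Dict.empty 0 0
  simp only [pvAnsB] at hA
  rw [hA, pvSolve_eq l hkeys]
  have hfold : (l.foldl (fun d p => d.insert p.1 (((PySem.Dict.ofList p.2).get? "parsed_answer").join)) PySem.Dict.empty).items
      = l.map (fun p => (p.1, pvAnsB p)) := by
    have := PySem.Dict.items_foldl_insert_fresh l Prod.fst pvAnsB PySem.Dict.empty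
      (by intro a _; simp) hkeys
    simpa [pvAnsB] using this
  simp only [pvAnsB] at hfold ⊢
  rw [hfold]
  refine Prod.ext rfl (Prod.ext ?_ ?_) <;> simp
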